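-- pv_equiv track=rewrite | github.com/bhadaljf/DevTrace.skill | devtrace/scripts/devtrace_write.py | split_embedded_heading_blocks
-- ===== SOURCE A (Python) =====
-- def split_embedded_heading_blocks(block: str) -> list[str]:
--     lines = block.splitlines()
--     if not lines:
--         return []
--     parts: list[str] = []
--     current: list[str] = []
--     for line in lines:
--         stripped = line.strip()
--         if stripped.startswith("#") and current and any(item.strip() for item in current):
--             parts.append("\n".join(current).strip())
--             current = [line]
--             continue
--         current.append(line)
--     if current and any(item.strip() for item in current):
--         parts.append("\n".join(current).strip())
--     return parts
-- ===== SOURCE B (Python) =====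
-- def split_embedded_heading_blocks(block: str) -> list[str]:
--     lines = block.splitlines()
--     marks = [i for i, line in enumerate(lines) if line.strip().startswith("#")]
--     bounds = [0] + marks + [len(lines)]
--     texts = ["\n".join(lines[a:b]).strip() for a, b in zip(bounds, bounds[1:])]
--     return [t for t in texts if t]
-- ===== Notes on version B (the rewrite author's own statement) =====
-- stated objective: alternative
-- what changed: B replaces A's stateful flush buffer and its non-whitespace-content guard by a staged index computation: it first collects the indices of heading lines, turns them into segment boundaries, then slices the line list between consecutive boundaries and joins, strips and filters the slices.
import Mathlib
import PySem

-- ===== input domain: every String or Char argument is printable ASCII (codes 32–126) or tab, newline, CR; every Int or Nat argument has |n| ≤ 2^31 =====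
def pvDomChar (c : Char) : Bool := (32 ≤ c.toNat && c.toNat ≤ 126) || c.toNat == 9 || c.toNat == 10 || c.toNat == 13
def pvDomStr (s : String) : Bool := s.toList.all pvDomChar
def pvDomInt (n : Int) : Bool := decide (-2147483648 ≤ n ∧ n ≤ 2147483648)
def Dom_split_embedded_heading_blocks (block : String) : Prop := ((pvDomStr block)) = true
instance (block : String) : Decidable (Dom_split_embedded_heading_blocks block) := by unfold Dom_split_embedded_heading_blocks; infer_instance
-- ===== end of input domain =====

-- B replaces A's stateful flush buffer by a staged index computation: it first collects the
-- indices of the heading lines, turns them into segment boundaries, and then slices, joins,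
-- strips and filters the segments (objective: alternative decomposition, same cost).

-- ===== PORT A =====
-- one iteration of A's 'for line in lines' loop over the state (parts, current)
def stepA (st : List String × List String) (line : String) : List String × List String :=
  let stripped := PySem.Str.strip line
  if PySem.Str.startswith stripped "#" && !st.2.isEmpty
      && st.2.any (fun item => !(PySem.Str.strip item == "")) then
    (st.1 ++ [PySem.Str.strip (PySem.Str.join "\n" st.2)], [line])
  else
    (st.1, st.2 ++ [line])

def split_embedded_heading_blocks (block : String) : List String :=
  let lines := PySem.Str.splitlines block
  if lines.isEmpty then []
  else
    let st := lines.foldl stepA ([], [])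
    if !st.2.isEmpty && st.2.any (fun item => !(PySem.Str.strip item == "")) then
      st.1 ++ [PySem.Str.strip (PySem.Str.join "\n" st.2)]
    else
      st.1

-- ===== PORT B =====
-- marks = heading indices; bounds = [0] + marks + [len]; slice, join+strip, drop empties
def split_embedded_heading_blocks_alt (block : String) : List String :=
  let lines := PySem.Str.splitlines block
  let marks := ((PySem.List.enumerate lines 0).filter
      (fun p => PySem.Str.startswith (PySem.Str.strip p.2) "#")).map (fun p => p.1)
  let bounds := (0 : Int) :: (marks ++ [(lines.length : Int)])
  let texts := (bounds.zip bounds.tail).map (fun ab =>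
      PySem.Str.strip (PySem.Str.join "\n" (PySem.List.slice lines (some ab.1) (some ab.2))))
  texts.filter (fun t => !(t == ""))

-- ===== PRECONDITION & SPEC =====
def Spec_split_embedded_heading_blocks (block : String) (out : List String) : Prop := out = split_embedded_heading_blocks_alt block
instance (block : String) (out : List String) : Decidable (Spec_split_embedded_heading_blocks block out) := by unfold Spec_split_embedded_heading_blocks; infer_instance

-- ===== CLAIM (what is proved, stated in full; the proofs are below) =====
def Claim_equal_split_embedded_heading_blocks : Prop := ∀ (block : String), Dom_split_embedded_heading_blocks block → Spec_split_embedded_heading_blocks block (split_embedded_heading_blocks block)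

-- ===== LEMMAS AND PROOFS =====

-- '\n'.join(seg).strip(), the value both programs emit for a segment
def js (seg : List String) : String := PySem.Str.strip (PySem.Str.join "\n" seg)

-- A's post-loop flush, as a function of the final (parts, current) state
def finishA (st : List String × List String) : List String :=
  if !st.2.isEmpty && st.2.any (fun item => !(PySem.Str.strip item == "")) then
    st.1 ++ [js st.2]
  else st.1

-- proof-only intermediate view: segments grown left-to-right, a new one at each heading line
def stepB (segs : List (List String)) (line : String) : List (List String) :=
  let segs := if PySem.Str.startswith (PySem.Str.strip line) "#" then segs ++ [[]] else segs
  segs.dropLast ++ [(segs.getLast?.getD []) ++ [line]]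

-- is this line a heading line?
def isHead (line : String) : Bool := PySem.Str.startswith (PySem.Str.strip line) "#"

-- B's heading-index list
def marksI (ls : List String) : List Int :=
  ((PySem.List.enumerate ls 0).filter (fun p => isHead p.2)).map (fun p => p.1)

-- B's segment list (the slices between consecutive bounds)
def segsI (ls : List String) : List (List String) :=
  ((((0 : Int) :: (marksI ls ++ [(ls.length : Int)])).zip
      ((0 : Int) :: (marksI ls ++ [(ls.length : Int)])).tail).map
    (fun ab => PySem.List.slice ls (some ab.1) (some ab.2)))

-- Chars-level: a list of chars strips to [] iff it is all whitespace
lemma strip_eq_nil_iff (cs : List Char) :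
    PySem.Chars.strip cs = [] ↔ ∀ c ∈ cs, PySem.Chars.isspace c = true := by
  simp only [PySem.Chars.strip, PySem.Chars.rstrip, PySem.Chars.lstrip, List.reverse_eq_nil_iff,
    List.dropWhile_eq_nil_iff, List.mem_reverse]
  constructor
  · intro h c hc
    rw [← List.takeWhile_append_dropWhile (p := PySem.Chars.isspace) (l := cs)] at hc
    rcases List.mem_append.mp hc with h1 | h1
    · exact List.mem_takeWhile_imp h1
    · exact h c h1
  · intro h c hc
    apply h
    rw [← List.takeWhile_append_dropWhile (p := PySem.Chars.isspace) (l := cs)]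
    exact List.mem_append_right _ hc

-- Chars-level: an all-whitespace prefix does not change strip
lemma strip_append_ws (w cs : List Char) (hw : ∀ c ∈ w, PySem.Chars.isspace c = true) :
    PySem.Chars.strip (w ++ cs) = PySem.Chars.strip cs := by
  simp [PySem.Chars.strip, PySem.Chars.lstrip, List.dropWhile_append,
    List.dropWhile_eq_nil_iff.mpr hw]

-- Chars-level: join "\n" is all-whitespace iff every part is
lemma join_ws_iff (parts : List (List Char)) :
    (∀ c ∈ PySem.Chars.join ['\n'] parts, PySem.Chars.isspace c = true) ↔
      ∀ cs ∈ parts, ∀ c ∈ cs, PySem.Chars.isspace c = true := by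
  induction parts with
  | nil => simp [PySem.Chars.join_nil]
  | cons x t ih =>
    cases t with
    | nil => simp [PySem.Chars.join_singleton]
    | cons y t' =>
      rw [PySem.Chars.join_cons_cons]
      simp only [List.mem_append, List.mem_cons] at *
      constructor
      · intro h
        refine fun cs hcs => ?_
        rcases hcs with rfl | hcs
        · exact fun c hc => h c (Or.inl (Or.inl hc))
        · exact ih.mp (fun c hc => h c (Or.inr hc)) cs hcs
      · intro h c hc
        rcases hc with (hc | hc) | hc
        · exact h x (Or.inl rfl) c hc
        · simp at hc; subst hc; decide
        · exact ih.mpr (fun cs hcs => h cs (Or.inr hcs)) c hc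

-- js seg = "" iff every line of seg strips to ""
lemma js_eq_empty_iff (seg : List String) :
    js seg = "" ↔ ∀ x ∈ seg, PySem.Str.strip x = "" := by
  rw [← String.toList_inj]
  simp only [js, PySem.Str.toList_strip, PySem.Str.toList_join]
  have hsep : ("\n" : String).toList = ['\n'] := by decide
  rw [hsep]
  show PySem.Chars.strip _ = ([] : List Char) ↔ _
  rw [strip_eq_nil_iff, join_ws_iff]
  constructor
  · intro h x hx
    rw [← String.toList_inj, PySem.Str.toList_strip]
    exact (strip_eq_nil_iff _).mpr (h x.toList (List.mem_map_of_mem hx))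
  · intro h cs hcs
    rcases List.mem_map.mp hcs with ⟨x, hx, rfl⟩
    have := h x hx
    rw [← String.toList_inj, PySem.Str.toList_strip] at this
    exact (strip_eq_nil_iff _).mp this

-- A's 'any(item.strip() for item in current)' guard is exactly 'js current ≠ ""'
lemma any_eq_js_ne (seg : List String) :
    seg.any (fun item => !(PySem.Str.strip item == "")) = !(js seg == "") := by
  rw [Bool.eq_iff_iff]
  simp only [List.any_eq_true, Bool.not_eq_eq_eq_not, Bool.not_true, beq_eq_false_iff_ne, ne_eq]
  rw [(by simp : (∃ x ∈ seg, ¬PySem.Str.strip x = "") ↔ ¬∀ x ∈ seg, PySem.Str.strip x = ""),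
    ← js_eq_empty_iff]

-- an all-whitespace group of leading lines does not change js
lemma js_append_ws (p cur : List String) (hp : ∀ x ∈ p, PySem.Str.strip x = "") :
    js (p ++ cur) = js cur := by
  induction p with
  | nil => simp
  | cons x t ih =>
    have hx : ∀ c ∈ x.toList, PySem.Chars.isspace c = true := by
      have := hp x (List.mem_cons_self ..)
      rw [← String.toList_inj, PySem.Str.toList_strip] at this
      exact (strip_eq_nil_iff _).mp this
    rw [← ih (fun y hy => hp y (List.mem_cons_of_mem _ hy))]
    rw [← String.toList_inj]
    simp only [js, PySem.Str.toList_strip, PySem.Str.toList_join]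
    have hsep : ("\n" : String).toList = ['\n'] := by decide
    rw [hsep]
    cases htl : (t ++ cur).map String.toList with
    | nil =>
      simp only [List.cons_append, List.map_cons, htl, PySem.Chars.join_singleton,
        PySem.Chars.join_nil]
      rw [(by simp : x.toList = x.toList ++ ([] : List Char)), strip_append_ws _ _ hx]
    | cons y t' =>
      simp only [List.cons_append, List.map_cons, htl, PySem.Chars.join_cons_cons]
      rw [List.append_assoc, strip_append_ws _ _ hx,
        strip_append_ws _ _ (by intro c hc; simp at hc; subst hc; decide)]

-- B's step on a segment list with an exposed last segment
lemma stepB_eq (done : List (List String)) (cur : List String) (line : String) :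
    stepB (done ++ [cur]) line =
      if PySem.Str.startswith (PySem.Str.strip line) "#" then
        (done ++ [cur]) ++ [[line]]
      else done ++ [cur ++ [line]] := by
  unfold stepB
  split_ifs with h <;> simp

-- the loop invariant: A's buffered state vs the grouped-segments view
lemma main_invariant (lines : List String) : ∀ (parts : List String)
    (done : List (List String)) (p cur : List String),
    (∀ x ∈ p, PySem.Str.strip x = "") →
    parts = (done.map js).filter (fun s => !(s == "")) →
    finishA (lines.foldl stepA (parts, p ++ cur))
    = ((lines.foldl stepB (done ++ [cur])).map js).filter (fun s => !(s == "")) := by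
  induction lines with
  | nil =>
    intro parts done p cur hp hparts
    simp only [List.foldl_nil, finishA]
    rw [any_eq_js_ne, js_append_ws p cur hp]
    by_cases hjs : js cur = ""
    · simp [hjs, hparts, List.filter_append]
    · have hcur : cur ≠ [] := by
        intro h; exact hjs (by rw [h]; exact (js_eq_empty_iff []).mpr (by simp))
      simp [hjs, hparts, List.filter_append, hcur]
  | cons line rest ih =>
    intro parts done p cur hp hparts
    simp only [List.foldl_cons]
    rw [stepB_eq]
    by_cases hh : PySem.Str.startswith (PySem.Str.strip line) "#" = true
    · rw [if_pos hh]
      by_cases hjs : js cur = ""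
      · have hguard : stepA (parts, p ++ cur) line = (parts, (p ++ cur) ++ [line]) := by
          unfold stepA
          rw [any_eq_js_ne, js_append_ws p cur hp, hjs]
          simp only [beq_self_eq_true, Bool.not_true, Bool.and_false, Bool.false_eq_true,
            if_false]
        rw [hguard]
        have hp' : ∀ x ∈ p ++ cur, PySem.Str.strip x = "" := by
          intro x hx
          rcases List.mem_append.mp hx with h1 | h1
          · exact hp x h1
          · exact (js_eq_empty_iff cur).mp hjs x h1
        have hparts' : parts = ((done ++ [cur]).map js).filter (fun s => !(s == "")) := by
          simp [List.filter_append, hjs, hparts]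
        have := ih parts (done ++ [cur]) (p ++ cur) [line] hp' hparts'
        simpa using this
      · have hcur : cur ≠ [] := by
          intro h; exact hjs (by rw [h]; exact (js_eq_empty_iff []).mpr (by simp))
        have hguard : stepA (parts, p ++ cur) line = (parts ++ [js cur], [line]) := by
          unfold stepA
          rw [any_eq_js_ne, js_append_ws p cur hp]
          have hh' : PySem.Chars.startswith (PySem.Chars.strip line.toList) ['#'] = true := by
            simpa using hh
          have hjs' : ¬ PySem.Str.strip (PySem.Str.join "\n" cur) = "" := hjs
          have hjoin : PySem.Str.strip (PySem.Str.join "\n" (p ++ cur))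
              = PySem.Str.strip (PySem.Str.join "\n" cur) := js_append_ws p cur hp
          simp [hh', hjs', hcur, js, hjoin]
        rw [hguard]
        have hparts' : parts ++ [js cur] = ((done ++ [cur]).map js).filter (fun s => !(s == "")) := by
          simp [List.filter_append, hjs, hparts]
        have := ih (parts ++ [js cur]) (done ++ [cur]) [] [line] (by simp) hparts'
        simpa using this
    · rw [if_neg hh]
      have hguard : stepA (parts, p ++ cur) line = (parts, (p ++ cur) ++ [line]) := by
        unfold stepA
        have hh' : ¬ PySem.Chars.startswith (PySem.Chars.strip line.toList) ['#'] = true := by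
          simpa using hh
        simp [hh']
      rw [hguard, List.append_assoc]
      exact ih parts done p (cur ++ [line]) hp hparts

-- A equals the grouped-segments view (over an arbitrary line list)
lemma split_eq_groups (lines : List String) :
    (if lines.isEmpty then [] else finishA (lines.foldl stepA ([], [])))
    = ((lines.foldl stepB [[]]).map js).filter (fun s => !(s == "")) := by
  cases lines with
  | nil =>
    simp only [List.isEmpty_nil, if_pos, List.foldl_nil, List.map_cons, List.map_nil]
    have : js [] = "" := (js_eq_empty_iff []).mpr (by simp)
    simp [this]
  | cons line rest =>
    simp only [List.isEmpty_cons, Bool.false_eq_true, if_false]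
    have := main_invariant (line :: rest) [] [] [] [] (by simp) (by simp)
    simpa using this

-- ===== bridge: grouped segments = slices between B's bounds =====

-- appending one line appends (at most) one heading index
lemma marksI_append (ls : List String) (x : String) :
    marksI (ls ++ [x])
      = marksI ls ++ (if isHead x then [(ls.length : Int)] else []) := by
  unfold marksI
  rw [PySem.List.enumerate_append]
  simp only [List.filter_append, List.map_append]
  congr 1
  cases hx : isHead x <;>
    simp [PySem.List.enumerate_cons, PySem.List.enumerate_nil, hx]

-- every heading index is a natural number below the length
lemma marksI_mem (ls : List String) (a : Int) (ha : a ∈ marksI ls) :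
    ∃ k : Nat, a = (k : Int) ∧ k < ls.length := by
  unfold marksI at ha
  rcases List.mem_map.mp ha with ⟨p, hp, rfl⟩
  rcases (PySem.List.mem_enumerate_iff _ _ _).mp (List.mem_filter.mp hp).1 with ⟨k, hk, hpe⟩
  subst hpe
  exact ⟨k, by simp, hk⟩

-- consecutive-pairs list of l ++ [c]
lemma zip_tail_append {α : Type} (l : List α) (c : α) (h : l ≠ []) :
    (l ++ [c]).zip (l ++ [c]).tail = l.zip l.tail ++ [(l.getLast h, c)] := by
  induction l with
  | nil => exact absurd rfl h
  | cons a t ih =>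
    cases t with
    | nil => simp
    | cons b t' =>
      have h2 : (b :: t') ≠ [] := by simp
      have hrec := ih h2
      simp only [List.cons_append, List.tail_cons, List.zip_cons_cons] at hrec ⊢
      rw [hrec, List.getLast_cons h2]

-- a slice whose end lies inside ls is unchanged by appending a line
lemma slice_frozen (ls : List String) (x : String) (a b : Int)
    (ha : 0 ≤ a) (hb : 0 ≤ b) (hbn : b.toNat ≤ ls.length) :
    PySem.List.slice (ls ++ [x]) (some a) (some b) = PySem.List.slice ls (some a) (some b) := by
  rw [PySem.List.slice_toNat _ ha hb, PySem.List.slice_toNat _ ha hb]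
  by_cases han : a.toNat ≤ ls.length
  · rw [List.drop_append_of_le_length han, List.take_append_of_le_length]
    simp only [List.length_drop]
    omega
  · have h0 : b.toNat - a.toNat = 0 := by omega
    simp [h0]

-- the last slice absorbs the appended line
lemma slice_extend (ls : List String) (x : String) (a : Int)
    (ha : 0 ≤ a) (han : a.toNat ≤ ls.length) :
    PySem.List.slice (ls ++ [x]) (some a) (some ((ls.length : Int) + 1))
      = PySem.List.slice ls (some a) (some (ls.length : Int)) ++ [x] := by
  rw [PySem.List.slice_toNat _ ha (by positivity), PySem.List.slice_toNat _ ha (by positivity)]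
  rw [List.drop_append_of_le_length han]
  have h1 : ((ls.length : Int) + 1).toNat = ls.length + 1 := by omega
  have h2 : ((ls.length : Int)).toNat = ls.length := by omega
  rw [h1, h2]
  rw [List.take_of_length_le
      (by simp only [List.length_append, List.length_drop, List.length_cons,
        List.length_nil]; omega),
    List.take_of_length_le (by simp only [List.length_drop]; exact Nat.le_refl _)]

-- the slicing map of B, as a named function
def slf (ls : List String) : Int × Int → List String :=
  fun ab => PySem.List.slice ls (some ab.1) (some ab.2)

-- B's segments computed from an arbitrary head-bound list
def segsOf (ls : List String) (hb : List Int) : List (List String) :=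
  ((hb ++ [(ls.length : Int)]).zip (hb ++ [(ls.length : Int)]).tail).map (slf ls)

lemma segsI_eq_segsOf (ls : List String) :
    segsI ls = segsOf ls ((0 : Int) :: marksI ls) := by
  unfold segsI segsOf slf
  simp

lemma segsOf_decomp (ls : List String) (hb : List Int) (h : hb ≠ []) :
    segsOf ls hb
      = (hb.zip hb.tail).map (slf ls) ++ [slf ls (hb.getLast h, (ls.length : Int))] := by
  unfold segsOf
  rw [zip_tail_append _ _ h]
  simp

-- elements of 0 :: marksI ls are naturals ≤ length
lemma headBounds_mem (ls : List String) (a : Int) (ha : a ∈ (0 : Int) :: marksI ls) :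
    0 ≤ a ∧ a.toNat ≤ ls.length := by
  rcases List.mem_cons.mp ha with rfl | ha
  · simp
  · rcases marksI_mem ls a ha with ⟨k, rfl, hk⟩
    constructor
    · positivity
    · simp; omega

-- the grouped segments ARE the slices between B's bounds
lemma segs_eq (ls : List String) : ls.foldl stepB [[]] = segsI ls := by
  induction ls using List.reverseRecOn with
  | nil => simp [segsI, marksI, PySem.List.enumerate_nil, PySem.List.slice]
  | append_singleton ls x ih =>
    have hne : ((0 : Int) :: marksI ls) ≠ [] := by simp
    rw [List.foldl_append, List.foldl_cons, List.foldl_nil, ih, segsI_eq_segsOf,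
      segsOf_decomp _ _ hne, stepB_eq]
    have hlast := (((0 : Int) :: marksI ls)).getLast_mem hne
    obtain ⟨hl0, hln⟩ := headBounds_mem ls _ hlast
    have hfrozen : ∀ ab ∈ (((0 : Int) :: marksI ls).zip ((0 : Int) :: marksI ls).tail),
        slf (ls ++ [x]) ab = slf ls ab := by
      intro ab hab
      obtain ⟨h1, h2⟩ := List.of_mem_zip (a := ab.1) (b := ab.2) (by simpa using hab)
      obtain ⟨ha0, _⟩ := headBounds_mem ls _ h1
      have h2' : ab.2 ∈ marksI ls := by simpa using h2
      rcases marksI_mem ls _ h2' with ⟨k, hk, hklt⟩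
      exact slice_frozen ls x _ _ ha0 (by omega) (by omega)
    have hlenc : (((ls ++ [x]).length : Int)) = (ls.length : Int) + 1 := by
      simp
    have hmid : slf (ls ++ [x]) ((((0 : Int) :: marksI ls)).getLast hne, (ls.length : Int))
        = slf ls ((((0 : Int) :: marksI ls)).getLast hne, (ls.length : Int)) :=
      slice_frozen ls x _ _ hl0 (by positivity) (by omega)
    by_cases hh : isHead x = true
    · rw [if_pos (by simpa [isHead] using hh)]
      rw [segsI_eq_segsOf, marksI_append, if_pos hh,
        (by simp : (0 : Int) :: (marksI ls ++ [(ls.length : Int)])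
            = ((0 : Int) :: marksI ls) ++ [(ls.length : Int)]),
        segsOf_decomp _ _ (by simp), zip_tail_append _ _ hne, List.map_append,
        List.map_congr_left hfrozen]
      have hnew : slf (ls ++ [x]) ((((0 : Int) :: marksI ls) ++ [(ls.length : Int)]).getLast
            (by simp), ((ls ++ [x]).length : Int)) = [x] := by
        show PySem.List.slice (ls ++ [x]) _ _ = [x]
        rw [(by simp :
              ((((0 : Int) :: marksI ls) ++ [(ls.length : Int)]).getLast (by simp))
                = (ls.length : Int)), hlenc]
        rw [PySem.List.slice_toNat _ (by positivity) (by positivity)]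
        have g2 : ((ls.length : Int)).toNat = ls.length := by omega
        have g3 : ((ls.length : Int) + 1).toNat = ls.length + 1 := by omega
        rw [g2, g3, List.drop_left]
        simp
      rw [hnew]
      simp [hmid]
    · rw [if_neg (by simpa [isHead] using hh)]
      rw [segsI_eq_segsOf, marksI_append, if_neg hh, List.append_nil,
        segsOf_decomp _ _ hne, List.map_congr_left hfrozen]
      have hext : slf (ls ++ [x]) ((((0 : Int) :: marksI ls)).getLast hne,
            ((ls ++ [x]).length : Int))
          = slf ls ((((0 : Int) :: marksI ls)).getLast hne, (ls.length : Int)) ++ [x] := by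
        show PySem.List.slice (ls ++ [x]) _ _ = _
        rw [hlenc]
        exact slice_extend ls x _ hl0 hln
      rw [hext]

-- B's body, as a function of the line list
lemma ports_eq (lines : List String) :
    (if lines.isEmpty then [] else finishA (lines.foldl stepA ([], [])))
    = (let marks := ((PySem.List.enumerate lines 0).filter
          (fun p => PySem.Str.startswith (PySem.Str.strip p.2) "#")).map (fun p => p.1)
       let bounds := (0 : Int) :: (marks ++ [(lines.length : Int)])
       let texts := (bounds.zip bounds.tail).map (fun ab =>
          PySem.Str.strip (PySem.Str.join "\n" (PySem.List.slice lines (some ab.1) (some ab.2))))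
       texts.filter (fun t => !(t == ""))) := by
  rw [split_eq_groups, segs_eq]
  simp only [segsI, marksI, isHead, List.map_map]
  rfl

-- ===== VERDICT (by name: the statement is the Claim_ definition above) =====
theorem split_embedded_heading_blocks_spec : Claim_equal_split_embedded_heading_blocks := by
  intro block _
  show split_embedded_heading_blocks block = split_embedded_heading_blocks_alt block
  exact ports_eq (PySem.Str.splitlines block)
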